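-- pv_equiv track=rewrite | github.com/anil-rupnar/75-Day-coding-challenge- | Day40.py | find_max_goal_scorer
-- ===== SOURCE A (Python) =====
-- def find_max_goal_scorer(x, y, z):
--     goals_lohia = 0
--     goals_gosu = 0
--
--     while z > 1:
--         if x >= y:
--             goals_lohia += 1
--             x -= 1
--         else:
--             goals_gosu += 1
--             y -= 1
--
--         z -= 1
--
--     return goals_lohia, goals_gosu
-- ===== SOURCE B (Python) =====
-- def find_max_goal_scorer(x, y, z):
--     n = max(z - 1, 0)
--     d = x - y
--     if d >= 0:
--         k = min(n, d + 1)
--         r = n - k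
--         return (k + r // 2, (r + 1) // 2)
--     else:
--         k = min(n, -d)
--         r = n - k
--         return ((r + 1) // 2, k + r // 2)
-- ===== Notes on version B (the rewrite author's own statement) =====
-- stated objective: faster
-- what changed: Replaces the O(z) step-by-step simulation loop by a closed-form O(1) computation: batch the initial run of one-sided decrements (min against |x-y|) and split the remaining steps of the ensuing alternation evenly with integer division.
import Mathlib
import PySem

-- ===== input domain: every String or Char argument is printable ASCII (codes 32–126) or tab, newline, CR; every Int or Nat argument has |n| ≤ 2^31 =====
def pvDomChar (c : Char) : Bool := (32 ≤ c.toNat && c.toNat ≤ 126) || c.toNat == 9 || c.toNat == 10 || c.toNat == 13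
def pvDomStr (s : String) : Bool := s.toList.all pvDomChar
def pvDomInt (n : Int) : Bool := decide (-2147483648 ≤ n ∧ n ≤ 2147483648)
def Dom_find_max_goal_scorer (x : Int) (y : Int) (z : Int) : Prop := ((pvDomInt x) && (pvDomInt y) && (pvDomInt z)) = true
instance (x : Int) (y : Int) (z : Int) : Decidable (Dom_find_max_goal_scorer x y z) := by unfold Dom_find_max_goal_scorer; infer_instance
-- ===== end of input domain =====

-- B replaces A's O(z) simulation loop by an O(1) closed form (batch the one-sided run, then split the alternation by integer division).

-- ===== PORT A =====
-- literal port of A's while-loop; terminates because z strictly decreases while z > 1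
def pvLoopA (x y z gl gg : Int) : Int × Int :=
  if z > 1 then
    if x ≥ y then pvLoopA (x - 1) y (z - 1) (gl + 1) gg
    else pvLoopA x (y - 1) (z - 1) gl (gg + 1)
  else (gl, gg)
termination_by (z - 1).toNat
decreasing_by all_goals (simp_wf; omega)

def find_max_goal_scorer (x : Int) (y : Int) (z : Int) : Int × Int :=
  pvLoopA x y z 0 0

-- ===== PORT B =====
def find_max_goal_scorer_alt (x : Int) (y : Int) (z : Int) : Int × Int :=
  let n := max (z - 1) 0
  let d := x - y
  if d ≥ 0 then
    let k := min n (d + 1)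
    let r := n - k
    (k + PySem.Int.floordiv r 2, PySem.Int.floordiv (r + 1) 2)
  else
    let k := min n (-d)
    let r := n - k
    (PySem.Int.floordiv (r + 1) 2, k + PySem.Int.floordiv r 2)

-- ===== PRECONDITION & SPEC =====
def Spec_find_max_goal_scorer (x : Int) (y : Int) (z : Int) (out : Int × Int) : Prop := out = find_max_goal_scorer_alt x y z
instance (x : Int) (y : Int) (z : Int) (out : Int × Int) : Decidable (Spec_find_max_goal_scorer x y z out) := by unfold Spec_find_max_goal_scorer; infer_instance

-- ===== CLAIM (what is proved, stated in full; the proofs are below) =====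
def Claim_equal_find_max_goal_scorer : Prop := ∀ (x : Int) (y : Int) (z : Int), Dom_find_max_goal_scorer x y z → Spec_find_max_goal_scorer x y z (find_max_goal_scorer x y z)

-- ===== LEMMAS AND PROOFS =====

-- closed form with floordiv rewritten to ediv (omega-friendly)
theorem alt_eq_ediv (x y z : Int) :
    find_max_goal_scorer_alt x y z =
      if x - y ≥ 0 then
        (min (max (z-1) 0) (x-y+1) + (max (z-1) 0 - min (max (z-1) 0) (x-y+1)) / 2,
         (max (z-1) 0 - min (max (z-1) 0) (x-y+1) + 1) / 2)
      else
        ((max (z-1) 0 - min (max (z-1) 0) (-(x-y)) + 1) / 2,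
         min (max (z-1) 0) (-(x-y)) + (max (z-1) 0 - min (max (z-1) 0) (-(x-y))) / 2) := by
  unfold find_max_goal_scorer_alt
  simp only [PySem.Int.floordiv_eq_ediv_of_pos (a := _) (by omega : (0:Int) < 2)]

-- one step of the loop matches the closed form
theorem alt_step (x y z : Int) (hz : z > 1) :
    find_max_goal_scorer_alt x y z =
      if x ≥ y then
        ((find_max_goal_scorer_alt (x-1) y (z-1)).1 + 1, (find_max_goal_scorer_alt (x-1) y (z-1)).2)
      else
        ((find_max_goal_scorer_alt x (y-1) (z-1)).1, (find_max_goal_scorer_alt x (y-1) (z-1)).2 + 1) := by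
  rw [alt_eq_ediv, alt_eq_ediv, alt_eq_ediv]
  split_ifs <;> (refine Prod.ext ?_ ?_ <;> simp <;> omega)

theorem loopA_eq (n : Nat) : ∀ (x y z gl gg : Int), (z - 1).toNat = n →
    pvLoopA x y z gl gg =
      (gl + (find_max_goal_scorer_alt x y z).1, gg + (find_max_goal_scorer_alt x y z).2) := by
  induction n with
  | zero =>
    intro x y z gl gg hn
    rw [pvLoopA]
    have hz : ¬ z > 1 := by omega
    rw [alt_eq_ediv]
    simp only [hz, if_false]
    split_ifs <;> (refine Prod.ext ?_ ?_ <;> simp <;> omega)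
  | succ m ih =>
    intro x y z gl gg hn
    have hz : z > 1 := by omega
    rw [pvLoopA, alt_step x y z hz]
    simp only [hz, if_true]
    by_cases hxy : x ≥ y
    · simp only [hxy, if_true]
      rw [ih (x-1) y (z-1) (gl+1) gg (by omega)]
      refine Prod.ext ?_ ?_ <;> simp <;> ring
    · simp only [hxy, if_false]
      rw [ih x (y-1) (z-1) gl (gg+1) (by omega)]
      refine Prod.ext ?_ ?_ <;> simp <;> ring

-- ===== VERDICT (by name: the statement is the Claim_ definition above) =====
theorem find_max_goal_scorer_spec : Claim_equal_find_max_goal_scorer := by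
  intro x y z _
  unfold Spec_find_max_goal_scorer find_max_goal_scorer
  rw [loopA_eq (z-1).toNat x y z 0 0 rfl]
  refine Prod.ext ?_ ?_ <;> simp
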